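-- pv_equiv track=rewrite | github.com/KodCode-AI/kodcode | demo/SFT_KodCode_prefill_200_1741214325/cross_verification_SFT_KodCode_prefill_200_1741214325/Prefill_00000007_I/trial_r1_1/solution.py | can_win_game
-- ===== SOURCE A (Python) =====
-- import itertools
--
-- def can_win_game(blocks, target_points):
--     point_values = {'blue': 1, 'green': 2, 'red': 3}
--     colors_present = [color for color in blocks if blocks.get(color, 0) > 0]
--
--     if not colors_present:
--         return target_points <= 0
--
--     max_score = 0
--
--     for permutation in itertools.permutations(colors_present):
--         temp_blocks = blocks.copy()
--         current_score = 0
--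
--         for color in permutation:
--             if temp_blocks.get(color, 0) <= 0:
--                 continue
--
--             higher_sum = 0
--             for other_color in colors_present:
--                 if other_color != color and temp_blocks.get(other_color, 0) > 0:
--                     if point_values[other_color] > point_values[color]:
--                         higher_sum += temp_blocks[other_color]
--
--             current_score += temp_blocks[color] * higher_sum
--             temp_blocks[color] = 0
--
--             if current_score >= target_points:
--                 return True
--
--         if current_score > max_score:
--             max_score = current_score
--
--             if max_score >= target_points:
--                 return True
--
--     return max_score >= target_points
-- ===== SOURCE B (Python) =====
-- def can_win_game(blocks, target_points):
--     point_values = {'blue': 1, 'green': 2, 'red': 3}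
--     present = {c: n for c, n in blocks.items() if n > 0}
--     best = sum(n * sum(m for o, m in present.items()
--                        if o != c and point_values[o] > point_values[c])
--                for c, n in present.items())
--     return best >= target_points
-- ===== Notes on version B (the rewrite author's own statement) =====
-- stated objective: simpler
-- what changed: Replaces the factorial enumeration of all removal orders (itertools.permutations plus a per-permutation removal simulation with early returns) by a single closed-form accumulation: each present color's count times the summed counts of strictly higher-valued present colors, which is exactly the best removal order's score.
import Mathlib
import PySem

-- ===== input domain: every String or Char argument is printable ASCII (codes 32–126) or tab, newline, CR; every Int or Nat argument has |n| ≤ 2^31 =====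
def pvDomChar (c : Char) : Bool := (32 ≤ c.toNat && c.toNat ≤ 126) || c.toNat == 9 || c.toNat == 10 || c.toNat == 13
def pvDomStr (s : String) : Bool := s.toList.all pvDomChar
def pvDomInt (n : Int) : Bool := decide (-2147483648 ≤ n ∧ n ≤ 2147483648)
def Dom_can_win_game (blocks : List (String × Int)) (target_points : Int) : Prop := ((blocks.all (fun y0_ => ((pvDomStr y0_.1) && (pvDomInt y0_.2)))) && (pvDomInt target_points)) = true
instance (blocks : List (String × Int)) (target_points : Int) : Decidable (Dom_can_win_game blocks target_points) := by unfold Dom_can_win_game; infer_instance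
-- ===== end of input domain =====

-- B replaces A's permutation enumeration and removal simulation by the direct closed-form
-- best score (each color's count times the counts of strictly higher-valued present colors).

-- ===== PORT A =====
-- the dict literal point_values = {'blue': 1, 'green': 2, 'red': 3}
def pvPointValues : PySem.Dict String Int :=
  PySem.Dict.mk [("blue", 1), ("green", 2), ("red", 3)]

-- the inner 'for other_color in colors_present' accumulation of higher_sum.
-- point_values[x] is ported as getD _ 0; the inputs where Python would raise KeyError
-- are excluded by Pre_, so the default is never the value used under the claim.
def pvHigherSum (temp : PySem.Dict String Int) (pres : List String) (c : String) : Int :=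
  pres.foldl (fun h o =>
    if o ≠ c ∧ temp.getD o 0 > 0 then
      if pvPointValues.getD o 0 > pvPointValues.getD c 0 then h + temp.getD o 0 else h
    else h) 0

-- the 'for color in permutation' loop; .inr true is the early 'return True',
-- .inl s means the loop fell through with current_score s
def pvInner (pres : List String) (t : Int) : List String → PySem.Dict String Int → Int → Sum Int Bool
  | [], _, score => .inl score
  | c :: rest, temp, score =>
    if temp.getD c 0 ≤ 0 then pvInner pres t rest temp score
    else
      let score' := score + temp.getD c 0 * pvHigherSum temp pres c
      if score' ≥ t then .inr true
      else pvInner pres t rest (temp.insert c 0) score'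

-- the 'for permutation in itertools.permutations(colors_present)' loop with max_score
def pvOuter (d : PySem.Dict String Int) (pres : List String) (t : Int) :
    List (List String) → Int → Bool
  | [], maxScore => decide (maxScore ≥ t)
  | p :: rest, maxScore =>
    match pvInner pres t p d 0 with
    | .inr b => b
    | .inl score =>
      if score > maxScore then
        if score ≥ t then true else pvOuter d pres t rest score
      else pvOuter d pres t rest maxScore

def can_win_game (blocks : List (String × Int)) (target_points : Int) : Bool :=
  let d := PySem.Dict.mk blocks
  let colors_present := d.keys.filter (fun c => d.getD c 0 > 0)
  if colors_present = [] then decide (target_points ≤ 0)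
  else pvOuter d colors_present target_points
        (PySem.List.permutations colors_present colors_present.length) 0

-- ===== PORT B =====
def can_win_game_alt (blocks : List (String × Int)) (target_points : Int) : Bool :=
  let pv := PySem.Dict.mk [("blue", (1 : Int)), ("green", 2), ("red", 3)]
  let present := blocks.foldl (fun d p => if p.2 > 0 then d.insert p.1 p.2 else d) PySem.Dict.empty
  let best := (present.items.map (fun c =>
      c.2 * (present.items.map (fun o =>
        if o.1 ≠ c.1 ∧ pv.getD o.1 0 > pv.getD c.1 0 then o.2 else 0)).sum)).sum
  decide (best ≥ target_points)

-- ===== PRECONDITION & SPEC =====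
-- Pre_ excludes (a) association lists with duplicate keys, which do not correspond to any
-- Python dict input, and (b) the inputs on which A raises KeyError: two or more present
-- colors (count > 0) of which at least one is outside {'blue','green','red'}.
def Pre_can_win_game (blocks : List (String × Int)) (target_points : Int) : Prop :=
  (blocks.map Prod.fst).Nodup ∧
  ((blocks.filter (fun p => p.2 > 0)).length ≤ 1 ∨
    ∀ p ∈ blocks.filter (fun p => p.2 > 0), p.1 = "blue" ∨ p.1 = "green" ∨ p.1 = "red")
instance (blocks : List (String × Int)) (target_points : Int) : Decidable (Pre_can_win_game blocks target_points) := by unfold Pre_can_win_game; infer_instance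

def pvWitness_can_win_game : (List (String × Int)) × Int := ([("blue", 2), ("green", 1), ("red", 0)], 2)

def Spec_can_win_game (blocks : List (String × Int)) (target_points : Int) (out : Bool) : Prop := out = can_win_game_alt blocks target_points
instance (blocks : List (String × Int)) (target_points : Int) (out : Bool) : Decidable (Spec_can_win_game blocks target_points out) := by unfold Spec_can_win_game; infer_instance

-- ===== CLAIM (what is proved, stated in full; the proofs are below) =====
def Claim_equal_can_win_game : Prop := ∀ (blocks : List (String × Int)) (target_points : Int), Dom_can_win_game blocks target_points → Pre_can_win_game blocks target_points → Spec_can_win_game blocks target_points (can_win_game blocks target_points)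

-- ===== LEMMAS AND PROOFS =====

-- the closed-form best score over a color list P with counts read from d
def pvScore (d : PySem.Dict String Int) (P : List String) : Int :=
  (P.map (fun c => d.getD c 0 *
    (P.map (fun o => if o ≠ c ∧ pvPointValues.getD o 0 > pvPointValues.getD c 0
                     then d.getD o 0 else 0)).sum)).sum

-- literal facts used when evaluating the ports on literal color lists
theorem pvE1 : ("blue" : String) ≠ "green" := by decide
theorem pvE2 : ("green" : String) ≠ "blue" := by decide
theorem pvE3 : ("blue" : String) ≠ "red" := by decide
theorem pvE4 : ("red" : String) ≠ "blue" := by decide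
theorem pvE5 : ("green" : String) ≠ "red" := by decide
theorem pvE6 : ("red" : String) ≠ "green" := by decide
theorem pvB1 : pvPointValues.getD "blue" 0 = 1 := by decide
theorem pvB2 : pvPointValues.getD "green" 0 = 2 := by decide
theorem pvB3 : pvPointValues.getD "red" 0 = 3 := by decide
theorem pvC12 : ((1 : Int) < 2) = True := by norm_num
theorem pvC21 : ((2 : Int) < 1) = False := by norm_num
theorem pvC13 : ((1 : Int) < 3) = True := by norm_num
theorem pvC31 : ((3 : Int) < 1) = False := by norm_num
theorem pvC23 : ((2 : Int) < 3) = True := by norm_num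
theorem pvC32 : ((3 : Int) < 2) = False := by norm_num
theorem pvZ1 : ((0 : Int) < 0) = False := by norm_num

theorem pv_outer_exists (d : PySem.Dict String Int) (P : List String) (t : Int)
    (ps : List (List String)) (m : Int)
    (h : ∀ p ∈ ps, pvInner P t p d 0 = Sum.inr true ∨
         ∃ s, pvInner P t p d 0 = Sum.inl s ∧ ¬ s ≥ t) :
    pvOuter d P t ps m
      = (ps.any (fun p => decide (pvInner P t p d 0 = Sum.inr true)) || decide (m ≥ t)) := by
  induction ps generalizing m with
  | nil => simp [pvOuter]
  | cons p ps ih =>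
    rcases h p (by simp) with hp | ⟨s, hs, hlt⟩
    · simp [pvOuter, hp]
    · have htail : ∀ q ∈ ps, pvInner P t q d 0 = Sum.inr true ∨
          ∃ s, pvInner P t q d 0 = Sum.inl s ∧ ¬ s ≥ t :=
        fun q hq => h q (by simp [hq])
      simp only [pvOuter, hs, List.any_cons]
      by_cases hsm : s > m
      · rw [if_pos hsm, if_neg hlt, ih s htail]
        have h1 : decide (s ≥ t) = false := by simp [hlt]
        have h2 : decide (m ≥ t) = false := by simp; omega
        have h3 : decide (Sum.inl s = (Sum.inr true : Sum Int Bool)) = false := by simp [hs]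
        simp [hs, h1, h2]
      · rw [if_neg hsm, ih m htail]
        simp [hs]


theorem pv_shape_b_g (d : PySem.Dict String Int) (t : Int) (hx : 0 < d.getD "blue" 0) (hy : 0 < d.getD "green" 0) :
    pvOuter d ["blue", "green"] t (PySem.List.permutations ["blue", "green"] 2) 0
      = decide (pvScore d ["blue", "green"] ≥ t) := by
  have hperm : PySem.List.permutations ["blue", "green"] 2 = [["blue", "green"], ["green", "blue"]] := by decide
  have hnx : ¬ d.getD "blue" 0 ≤ 0 := by omega
  have hny : ¬ d.getD "green" 0 ≤ 0 := by omega
  rw [hperm]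
  have hIn : ∀ p ∈ ([["blue", "green"], ["green", "blue"]] : List (List String)),
      pvInner ["blue", "green"] t p d 0 = Sum.inr true ∨
      ∃ s, pvInner ["blue", "green"] t p d 0 = Sum.inl s ∧ ¬ s ≥ t := by
    intro p hp
    simp only [List.mem_cons, List.not_mem_nil, or_false] at hp
    rcases hp with rfl | rfl <;>
      (simp only [pvInner, pvHigherSum, List.foldl, PySem.Dict.getD_insert, pvE1, pvE2, pvE3, pvE4,
      pvE5, pvE6, pvB1, pvB2, pvB3, pvC12, pvC21, pvC13, pvC31, pvC23, pvC32, pvZ1, ne_eq,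
      not_false_eq_true, not_true_eq_false, if_true, if_false, true_and, false_and, and_true,
      and_false, gt_iff_lt, reduceIte, mul_add, mul_zero, zero_add, add_zero, hx, hnx, hy, hny]
       split_ifs <;> first | (left; rfl) | (right; exact ⟨_, rfl, by assumption⟩))
  rw [pv_outer_exists d ["blue", "green"] t [["blue", "green"], ["green", "blue"]] 0 hIn]
  simp only [List.any_cons, List.any_nil, pvScore, List.map, List.sum_cons, List.sum_nil,
    pvInner, pvHigherSum, List.foldl, PySem.Dict.getD_insert, pvE1, pvE2, pvE3, pvE4,
      pvE5, pvE6, pvB1, pvB2, pvB3, pvC12, pvC21, pvC13, pvC31, pvC23, pvC32, pvZ1, ne_eq,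
      not_false_eq_true, not_true_eq_false, if_true, if_false, true_and, false_and, and_true,
      and_false, gt_iff_lt, reduceIte, mul_add, mul_zero, zero_add, add_zero, hx, hnx, hy, hny, ite_eq_iff, reduceCtorEq, or_false, false_or, imp_false,
    Bool.or_false, Bool.false_or]
  generalize hGx : d.getD "blue" 0 = x at hx ⊢
  generalize hGy : d.getD "green" 0 = y at hy ⊢
  have hpxy : 0 < x * y := mul_pos hx hy
  generalize x * y = Pxy at hpxy ⊢
  rw [Bool.eq_iff_iff]
  simp only [Bool.or_eq_true, decide_eq_true_eq]
  omega

theorem pv_shape_g_b (d : PySem.Dict String Int) (t : Int) (hy : 0 < d.getD "green" 0) (hx : 0 < d.getD "blue" 0) :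
    pvOuter d ["green", "blue"] t (PySem.List.permutations ["green", "blue"] 2) 0
      = decide (pvScore d ["green", "blue"] ≥ t) := by
  have hperm : PySem.List.permutations ["green", "blue"] 2 = [["green", "blue"], ["blue", "green"]] := by decide
  have hny : ¬ d.getD "green" 0 ≤ 0 := by omega
  have hnx : ¬ d.getD "blue" 0 ≤ 0 := by omega
  rw [hperm]
  have hIn : ∀ p ∈ ([["green", "blue"], ["blue", "green"]] : List (List String)),
      pvInner ["green", "blue"] t p d 0 = Sum.inr true ∨
      ∃ s, pvInner ["green", "blue"] t p d 0 = Sum.inl s ∧ ¬ s ≥ t := by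
    intro p hp
    simp only [List.mem_cons, List.not_mem_nil, or_false] at hp
    rcases hp with rfl | rfl <;>
      (simp only [pvInner, pvHigherSum, List.foldl, PySem.Dict.getD_insert, pvE1, pvE2, pvE3, pvE4,
      pvE5, pvE6, pvB1, pvB2, pvB3, pvC12, pvC21, pvC13, pvC31, pvC23, pvC32, pvZ1, ne_eq,
      not_false_eq_true, not_true_eq_false, if_true, if_false, true_and, false_and, and_true,
      and_false, gt_iff_lt, reduceIte, mul_add, mul_zero, zero_add, add_zero, hy, hny, hx, hnx]
       split_ifs <;> first | (left; rfl) | (right; exact ⟨_, rfl, by assumption⟩))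
  rw [pv_outer_exists d ["green", "blue"] t [["green", "blue"], ["blue", "green"]] 0 hIn]
  simp only [List.any_cons, List.any_nil, pvScore, List.map, List.sum_cons, List.sum_nil,
    pvInner, pvHigherSum, List.foldl, PySem.Dict.getD_insert, pvE1, pvE2, pvE3, pvE4,
      pvE5, pvE6, pvB1, pvB2, pvB3, pvC12, pvC21, pvC13, pvC31, pvC23, pvC32, pvZ1, ne_eq,
      not_false_eq_true, not_true_eq_false, if_true, if_false, true_and, false_and, and_true,
      and_false, gt_iff_lt, reduceIte, mul_add, mul_zero, zero_add, add_zero, hy, hny, hx, hnx, ite_eq_iff, reduceCtorEq, or_false, false_or, imp_false,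
    Bool.or_false, Bool.false_or]
  generalize hGy : d.getD "green" 0 = y at hy ⊢
  generalize hGx : d.getD "blue" 0 = x at hx ⊢
  have hpxy : 0 < x * y := mul_pos hx hy
  generalize x * y = Pxy at hpxy ⊢
  rw [Bool.eq_iff_iff]
  simp only [Bool.or_eq_true, decide_eq_true_eq]
  omega

theorem pv_shape_b_r (d : PySem.Dict String Int) (t : Int) (hx : 0 < d.getD "blue" 0) (hz : 0 < d.getD "red" 0) :
    pvOuter d ["blue", "red"] t (PySem.List.permutations ["blue", "red"] 2) 0
      = decide (pvScore d ["blue", "red"] ≥ t) := by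
  have hperm : PySem.List.permutations ["blue", "red"] 2 = [["blue", "red"], ["red", "blue"]] := by decide
  have hnx : ¬ d.getD "blue" 0 ≤ 0 := by omega
  have hnz : ¬ d.getD "red" 0 ≤ 0 := by omega
  rw [hperm]
  have hIn : ∀ p ∈ ([["blue", "red"], ["red", "blue"]] : List (List String)),
      pvInner ["blue", "red"] t p d 0 = Sum.inr true ∨
      ∃ s, pvInner ["blue", "red"] t p d 0 = Sum.inl s ∧ ¬ s ≥ t := by
    intro p hp
    simp only [List.mem_cons, List.not_mem_nil, or_false] at hp
    rcases hp with rfl | rfl <;>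
      (simp only [pvInner, pvHigherSum, List.foldl, PySem.Dict.getD_insert, pvE1, pvE2, pvE3, pvE4,
      pvE5, pvE6, pvB1, pvB2, pvB3, pvC12, pvC21, pvC13, pvC31, pvC23, pvC32, pvZ1, ne_eq,
      not_false_eq_true, not_true_eq_false, if_true, if_false, true_and, false_and, and_true,
      and_false, gt_iff_lt, reduceIte, mul_add, mul_zero, zero_add, add_zero, hx, hnx, hz, hnz]
       split_ifs <;> first | (left; rfl) | (right; exact ⟨_, rfl, by assumption⟩))
  rw [pv_outer_exists d ["blue", "red"] t [["blue", "red"], ["red", "blue"]] 0 hIn]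
  simp only [List.any_cons, List.any_nil, pvScore, List.map, List.sum_cons, List.sum_nil,
    pvInner, pvHigherSum, List.foldl, PySem.Dict.getD_insert, pvE1, pvE2, pvE3, pvE4,
      pvE5, pvE6, pvB1, pvB2, pvB3, pvC12, pvC21, pvC13, pvC31, pvC23, pvC32, pvZ1, ne_eq,
      not_false_eq_true, not_true_eq_false, if_true, if_false, true_and, false_and, and_true,
      and_false, gt_iff_lt, reduceIte, mul_add, mul_zero, zero_add, add_zero, hx, hnx, hz, hnz, ite_eq_iff, reduceCtorEq, or_false, false_or, imp_false,
    Bool.or_false, Bool.false_or]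
  generalize hGx : d.getD "blue" 0 = x at hx ⊢
  generalize hGz : d.getD "red" 0 = z at hz ⊢
  have hpxz : 0 < x * z := mul_pos hx hz
  generalize x * z = Pxz at hpxz ⊢
  rw [Bool.eq_iff_iff]
  simp only [Bool.or_eq_true, decide_eq_true_eq]
  omega

theorem pv_shape_r_b (d : PySem.Dict String Int) (t : Int) (hz : 0 < d.getD "red" 0) (hx : 0 < d.getD "blue" 0) :
    pvOuter d ["red", "blue"] t (PySem.List.permutations ["red", "blue"] 2) 0
      = decide (pvScore d ["red", "blue"] ≥ t) := by
  have hperm : PySem.List.permutations ["red", "blue"] 2 = [["red", "blue"], ["blue", "red"]] := by decide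
  have hnz : ¬ d.getD "red" 0 ≤ 0 := by omega
  have hnx : ¬ d.getD "blue" 0 ≤ 0 := by omega
  rw [hperm]
  have hIn : ∀ p ∈ ([["red", "blue"], ["blue", "red"]] : List (List String)),
      pvInner ["red", "blue"] t p d 0 = Sum.inr true ∨
      ∃ s, pvInner ["red", "blue"] t p d 0 = Sum.inl s ∧ ¬ s ≥ t := by
    intro p hp
    simp only [List.mem_cons, List.not_mem_nil, or_false] at hp
    rcases hp with rfl | rfl <;>
      (simp only [pvInner, pvHigherSum, List.foldl, PySem.Dict.getD_insert, pvE1, pvE2, pvE3, pvE4,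
      pvE5, pvE6, pvB1, pvB2, pvB3, pvC12, pvC21, pvC13, pvC31, pvC23, pvC32, pvZ1, ne_eq,
      not_false_eq_true, not_true_eq_false, if_true, if_false, true_and, false_and, and_true,
      and_false, gt_iff_lt, reduceIte, mul_add, mul_zero, zero_add, add_zero, hz, hnz, hx, hnx]
       split_ifs <;> first | (left; rfl) | (right; exact ⟨_, rfl, by assumption⟩))
  rw [pv_outer_exists d ["red", "blue"] t [["red", "blue"], ["blue", "red"]] 0 hIn]
  simp only [List.any_cons, List.any_nil, pvScore, List.map, List.sum_cons, List.sum_nil,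
    pvInner, pvHigherSum, List.foldl, PySem.Dict.getD_insert, pvE1, pvE2, pvE3, pvE4,
      pvE5, pvE6, pvB1, pvB2, pvB3, pvC12, pvC21, pvC13, pvC31, pvC23, pvC32, pvZ1, ne_eq,
      not_false_eq_true, not_true_eq_false, if_true, if_false, true_and, false_and, and_true,
      and_false, gt_iff_lt, reduceIte, mul_add, mul_zero, zero_add, add_zero, hz, hnz, hx, hnx, ite_eq_iff, reduceCtorEq, or_false, false_or, imp_false,
    Bool.or_false, Bool.false_or]
  generalize hGz : d.getD "red" 0 = z at hz ⊢
  generalize hGx : d.getD "blue" 0 = x at hx ⊢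
  have hpxz : 0 < x * z := mul_pos hx hz
  generalize x * z = Pxz at hpxz ⊢
  rw [Bool.eq_iff_iff]
  simp only [Bool.or_eq_true, decide_eq_true_eq]
  omega

theorem pv_shape_g_r (d : PySem.Dict String Int) (t : Int) (hy : 0 < d.getD "green" 0) (hz : 0 < d.getD "red" 0) :
    pvOuter d ["green", "red"] t (PySem.List.permutations ["green", "red"] 2) 0
      = decide (pvScore d ["green", "red"] ≥ t) := by
  have hperm : PySem.List.permutations ["green", "red"] 2 = [["green", "red"], ["red", "green"]] := by decide
  have hny : ¬ d.getD "green" 0 ≤ 0 := by omega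
  have hnz : ¬ d.getD "red" 0 ≤ 0 := by omega
  rw [hperm]
  have hIn : ∀ p ∈ ([["green", "red"], ["red", "green"]] : List (List String)),
      pvInner ["green", "red"] t p d 0 = Sum.inr true ∨
      ∃ s, pvInner ["green", "red"] t p d 0 = Sum.inl s ∧ ¬ s ≥ t := by
    intro p hp
    simp only [List.mem_cons, List.not_mem_nil, or_false] at hp
    rcases hp with rfl | rfl <;>
      (simp only [pvInner, pvHigherSum, List.foldl, PySem.Dict.getD_insert, pvE1, pvE2, pvE3, pvE4,
      pvE5, pvE6, pvB1, pvB2, pvB3, pvC12, pvC21, pvC13, pvC31, pvC23, pvC32, pvZ1, ne_eq,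
      not_false_eq_true, not_true_eq_false, if_true, if_false, true_and, false_and, and_true,
      and_false, gt_iff_lt, reduceIte, mul_add, mul_zero, zero_add, add_zero, hy, hny, hz, hnz]
       split_ifs <;> first | (left; rfl) | (right; exact ⟨_, rfl, by assumption⟩))
  rw [pv_outer_exists d ["green", "red"] t [["green", "red"], ["red", "green"]] 0 hIn]
  simp only [List.any_cons, List.any_nil, pvScore, List.map, List.sum_cons, List.sum_nil,
    pvInner, pvHigherSum, List.foldl, PySem.Dict.getD_insert, pvE1, pvE2, pvE3, pvE4,
      pvE5, pvE6, pvB1, pvB2, pvB3, pvC12, pvC21, pvC13, pvC31, pvC23, pvC32, pvZ1, ne_eq,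
      not_false_eq_true, not_true_eq_false, if_true, if_false, true_and, false_and, and_true,
      and_false, gt_iff_lt, reduceIte, mul_add, mul_zero, zero_add, add_zero, hy, hny, hz, hnz, ite_eq_iff, reduceCtorEq, or_false, false_or, imp_false,
    Bool.or_false, Bool.false_or]
  generalize hGy : d.getD "green" 0 = y at hy ⊢
  generalize hGz : d.getD "red" 0 = z at hz ⊢
  have hpyz : 0 < y * z := mul_pos hy hz
  generalize y * z = Pyz at hpyz ⊢
  rw [Bool.eq_iff_iff]
  simp only [Bool.or_eq_true, decide_eq_true_eq]
  omega

theorem pv_shape_r_g (d : PySem.Dict String Int) (t : Int) (hz : 0 < d.getD "red" 0) (hy : 0 < d.getD "green" 0) :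
    pvOuter d ["red", "green"] t (PySem.List.permutations ["red", "green"] 2) 0
      = decide (pvScore d ["red", "green"] ≥ t) := by
  have hperm : PySem.List.permutations ["red", "green"] 2 = [["red", "green"], ["green", "red"]] := by decide
  have hnz : ¬ d.getD "red" 0 ≤ 0 := by omega
  have hny : ¬ d.getD "green" 0 ≤ 0 := by omega
  rw [hperm]
  have hIn : ∀ p ∈ ([["red", "green"], ["green", "red"]] : List (List String)),
      pvInner ["red", "green"] t p d 0 = Sum.inr true ∨
      ∃ s, pvInner ["red", "green"] t p d 0 = Sum.inl s ∧ ¬ s ≥ t := by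
    intro p hp
    simp only [List.mem_cons, List.not_mem_nil, or_false] at hp
    rcases hp with rfl | rfl <;>
      (simp only [pvInner, pvHigherSum, List.foldl, PySem.Dict.getD_insert, pvE1, pvE2, pvE3, pvE4,
      pvE5, pvE6, pvB1, pvB2, pvB3, pvC12, pvC21, pvC13, pvC31, pvC23, pvC32, pvZ1, ne_eq,
      not_false_eq_true, not_true_eq_false, if_true, if_false, true_and, false_and, and_true,
      and_false, gt_iff_lt, reduceIte, mul_add, mul_zero, zero_add, add_zero, hz, hnz, hy, hny]
       split_ifs <;> first | (left; rfl) | (right; exact ⟨_, rfl, by assumption⟩))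
  rw [pv_outer_exists d ["red", "green"] t [["red", "green"], ["green", "red"]] 0 hIn]
  simp only [List.any_cons, List.any_nil, pvScore, List.map, List.sum_cons, List.sum_nil,
    pvInner, pvHigherSum, List.foldl, PySem.Dict.getD_insert, pvE1, pvE2, pvE3, pvE4,
      pvE5, pvE6, pvB1, pvB2, pvB3, pvC12, pvC21, pvC13, pvC31, pvC23, pvC32, pvZ1, ne_eq,
      not_false_eq_true, not_true_eq_false, if_true, if_false, true_and, false_and, and_true,
      and_false, gt_iff_lt, reduceIte, mul_add, mul_zero, zero_add, add_zero, hz, hnz, hy, hny, ite_eq_iff, reduceCtorEq, or_false, false_or, imp_false,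
    Bool.or_false, Bool.false_or]
  generalize hGz : d.getD "red" 0 = z at hz ⊢
  generalize hGy : d.getD "green" 0 = y at hy ⊢
  have hpyz : 0 < y * z := mul_pos hy hz
  generalize y * z = Pyz at hpyz ⊢
  rw [Bool.eq_iff_iff]
  simp only [Bool.or_eq_true, decide_eq_true_eq]
  omega

theorem pv_shape_b_g_r (d : PySem.Dict String Int) (t : Int) (hx : 0 < d.getD "blue" 0) (hy : 0 < d.getD "green" 0) (hz : 0 < d.getD "red" 0) :
    pvOuter d ["blue", "green", "red"] t (PySem.List.permutations ["blue", "green", "red"] 3) 0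
      = decide (pvScore d ["blue", "green", "red"] ≥ t) := by
  have hperm : PySem.List.permutations ["blue", "green", "red"] 3 = [["blue", "green", "red"], ["blue", "red", "green"], ["green", "blue", "red"], ["green", "red", "blue"], ["red", "blue", "green"], ["red", "green", "blue"]] := by decide
  have hnx : ¬ d.getD "blue" 0 ≤ 0 := by omega
  have hny : ¬ d.getD "green" 0 ≤ 0 := by omega
  have hnz : ¬ d.getD "red" 0 ≤ 0 := by omega
  rw [hperm]
  have hIn : ∀ p ∈ ([["blue", "green", "red"], ["blue", "red", "green"], ["green", "blue", "red"], ["green", "red", "blue"], ["red", "blue", "green"], ["red", "green", "blue"]] : List (List String)),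
      pvInner ["blue", "green", "red"] t p d 0 = Sum.inr true ∨
      ∃ s, pvInner ["blue", "green", "red"] t p d 0 = Sum.inl s ∧ ¬ s ≥ t := by
    intro p hp
    simp only [List.mem_cons, List.not_mem_nil, or_false] at hp
    rcases hp with rfl | rfl | rfl | rfl | rfl | rfl <;>
      (simp only [pvInner, pvHigherSum, List.foldl, PySem.Dict.getD_insert, pvE1, pvE2, pvE3, pvE4,
      pvE5, pvE6, pvB1, pvB2, pvB3, pvC12, pvC21, pvC13, pvC31, pvC23, pvC32, pvZ1, ne_eq,
      not_false_eq_true, not_true_eq_false, if_true, if_false, true_and, false_and, and_true,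
      and_false, gt_iff_lt, reduceIte, mul_add, mul_zero, zero_add, add_zero, hx, hnx, hy, hny, hz, hnz]
       split_ifs <;> first | (left; rfl) | (right; exact ⟨_, rfl, by assumption⟩))
  rw [pv_outer_exists d ["blue", "green", "red"] t [["blue", "green", "red"], ["blue", "red", "green"], ["green", "blue", "red"], ["green", "red", "blue"], ["red", "blue", "green"], ["red", "green", "blue"]] 0 hIn]
  simp only [List.any_cons, List.any_nil, pvScore, List.map, List.sum_cons, List.sum_nil,
    pvInner, pvHigherSum, List.foldl, PySem.Dict.getD_insert, pvE1, pvE2, pvE3, pvE4,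
      pvE5, pvE6, pvB1, pvB2, pvB3, pvC12, pvC21, pvC13, pvC31, pvC23, pvC32, pvZ1, ne_eq,
      not_false_eq_true, not_true_eq_false, if_true, if_false, true_and, false_and, and_true,
      and_false, gt_iff_lt, reduceIte, mul_add, mul_zero, zero_add, add_zero, hx, hnx, hy, hny, hz, hnz, ite_eq_iff, reduceCtorEq, or_false, false_or, imp_false,
    Bool.or_false, Bool.false_or]
  generalize hGx : d.getD "blue" 0 = x at hx ⊢
  generalize hGy : d.getD "green" 0 = y at hy ⊢
  generalize hGz : d.getD "red" 0 = z at hz ⊢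
  have hpxy : 0 < x * y := mul_pos hx hy
  have hpxz : 0 < x * z := mul_pos hx hz
  have hpyz : 0 < y * z := mul_pos hy hz
  generalize x * y = Pxy at hpxy ⊢
  generalize x * z = Pxz at hpxz ⊢
  generalize y * z = Pyz at hpyz ⊢
  rw [Bool.eq_iff_iff]
  simp only [Bool.or_eq_true, decide_eq_true_eq]
  omega

theorem pv_shape_b_r_g (d : PySem.Dict String Int) (t : Int) (hx : 0 < d.getD "blue" 0) (hz : 0 < d.getD "red" 0) (hy : 0 < d.getD "green" 0) :
    pvOuter d ["blue", "red", "green"] t (PySem.List.permutations ["blue", "red", "green"] 3) 0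
      = decide (pvScore d ["blue", "red", "green"] ≥ t) := by
  have hperm : PySem.List.permutations ["blue", "red", "green"] 3 = [["blue", "red", "green"], ["blue", "green", "red"], ["red", "blue", "green"], ["red", "green", "blue"], ["green", "blue", "red"], ["green", "red", "blue"]] := by decide
  have hnx : ¬ d.getD "blue" 0 ≤ 0 := by omega
  have hnz : ¬ d.getD "red" 0 ≤ 0 := by omega
  have hny : ¬ d.getD "green" 0 ≤ 0 := by omega
  rw [hperm]
  have hIn : ∀ p ∈ ([["blue", "red", "green"], ["blue", "green", "red"], ["red", "blue", "green"], ["red", "green", "blue"], ["green", "blue", "red"], ["green", "red", "blue"]] : List (List String)),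
      pvInner ["blue", "red", "green"] t p d 0 = Sum.inr true ∨
      ∃ s, pvInner ["blue", "red", "green"] t p d 0 = Sum.inl s ∧ ¬ s ≥ t := by
    intro p hp
    simp only [List.mem_cons, List.not_mem_nil, or_false] at hp
    rcases hp with rfl | rfl | rfl | rfl | rfl | rfl <;>
      (simp only [pvInner, pvHigherSum, List.foldl, PySem.Dict.getD_insert, pvE1, pvE2, pvE3, pvE4,
      pvE5, pvE6, pvB1, pvB2, pvB3, pvC12, pvC21, pvC13, pvC31, pvC23, pvC32, pvZ1, ne_eq,
      not_false_eq_true, not_true_eq_false, if_true, if_false, true_and, false_and, and_true,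
      and_false, gt_iff_lt, reduceIte, mul_add, mul_zero, zero_add, add_zero, hx, hnx, hz, hnz, hy, hny]
       split_ifs <;> first | (left; rfl) | (right; exact ⟨_, rfl, by assumption⟩))
  rw [pv_outer_exists d ["blue", "red", "green"] t [["blue", "red", "green"], ["blue", "green", "red"], ["red", "blue", "green"], ["red", "green", "blue"], ["green", "blue", "red"], ["green", "red", "blue"]] 0 hIn]
  simp only [List.any_cons, List.any_nil, pvScore, List.map, List.sum_cons, List.sum_nil,
    pvInner, pvHigherSum, List.foldl, PySem.Dict.getD_insert, pvE1, pvE2, pvE3, pvE4,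
      pvE5, pvE6, pvB1, pvB2, pvB3, pvC12, pvC21, pvC13, pvC31, pvC23, pvC32, pvZ1, ne_eq,
      not_false_eq_true, not_true_eq_false, if_true, if_false, true_and, false_and, and_true,
      and_false, gt_iff_lt, reduceIte, mul_add, mul_zero, zero_add, add_zero, hx, hnx, hz, hnz, hy, hny, ite_eq_iff, reduceCtorEq, or_false, false_or, imp_false,
    Bool.or_false, Bool.false_or]
  generalize hGx : d.getD "blue" 0 = x at hx ⊢
  generalize hGz : d.getD "red" 0 = z at hz ⊢
  generalize hGy : d.getD "green" 0 = y at hy ⊢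
  have hpxz : 0 < x * z := mul_pos hx hz
  have hpxy : 0 < x * y := mul_pos hx hy
  have hpyz : 0 < y * z := mul_pos hy hz
  generalize x * z = Pxz at hpxz ⊢
  generalize x * y = Pxy at hpxy ⊢
  generalize y * z = Pyz at hpyz ⊢
  rw [Bool.eq_iff_iff]
  simp only [Bool.or_eq_true, decide_eq_true_eq]
  omega

theorem pv_shape_g_b_r (d : PySem.Dict String Int) (t : Int) (hy : 0 < d.getD "green" 0) (hx : 0 < d.getD "blue" 0) (hz : 0 < d.getD "red" 0) :
    pvOuter d ["green", "blue", "red"] t (PySem.List.permutations ["green", "blue", "red"] 3) 0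
      = decide (pvScore d ["green", "blue", "red"] ≥ t) := by
  have hperm : PySem.List.permutations ["green", "blue", "red"] 3 = [["green", "blue", "red"], ["green", "red", "blue"], ["blue", "green", "red"], ["blue", "red", "green"], ["red", "green", "blue"], ["red", "blue", "green"]] := by decide
  have hny : ¬ d.getD "green" 0 ≤ 0 := by omega
  have hnx : ¬ d.getD "blue" 0 ≤ 0 := by omega
  have hnz : ¬ d.getD "red" 0 ≤ 0 := by omega
  rw [hperm]
  have hIn : ∀ p ∈ ([["green", "blue", "red"], ["green", "red", "blue"], ["blue", "green", "red"], ["blue", "red", "green"], ["red", "green", "blue"], ["red", "blue", "green"]] : List (List String)),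
      pvInner ["green", "blue", "red"] t p d 0 = Sum.inr true ∨
      ∃ s, pvInner ["green", "blue", "red"] t p d 0 = Sum.inl s ∧ ¬ s ≥ t := by
    intro p hp
    simp only [List.mem_cons, List.not_mem_nil, or_false] at hp
    rcases hp with rfl | rfl | rfl | rfl | rfl | rfl <;>
      (simp only [pvInner, pvHigherSum, List.foldl, PySem.Dict.getD_insert, pvE1, pvE2, pvE3, pvE4,
      pvE5, pvE6, pvB1, pvB2, pvB3, pvC12, pvC21, pvC13, pvC31, pvC23, pvC32, pvZ1, ne_eq,
      not_false_eq_true, not_true_eq_false, if_true, if_false, true_and, false_and, and_true,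
      and_false, gt_iff_lt, reduceIte, mul_add, mul_zero, zero_add, add_zero, hy, hny, hx, hnx, hz, hnz]
       split_ifs <;> first | (left; rfl) | (right; exact ⟨_, rfl, by assumption⟩))
  rw [pv_outer_exists d ["green", "blue", "red"] t [["green", "blue", "red"], ["green", "red", "blue"], ["blue", "green", "red"], ["blue", "red", "green"], ["red", "green", "blue"], ["red", "blue", "green"]] 0 hIn]
  simp only [List.any_cons, List.any_nil, pvScore, List.map, List.sum_cons, List.sum_nil,
    pvInner, pvHigherSum, List.foldl, PySem.Dict.getD_insert, pvE1, pvE2, pvE3, pvE4,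
      pvE5, pvE6, pvB1, pvB2, pvB3, pvC12, pvC21, pvC13, pvC31, pvC23, pvC32, pvZ1, ne_eq,
      not_false_eq_true, not_true_eq_false, if_true, if_false, true_and, false_and, and_true,
      and_false, gt_iff_lt, reduceIte, mul_add, mul_zero, zero_add, add_zero, hy, hny, hx, hnx, hz, hnz, ite_eq_iff, reduceCtorEq, or_false, false_or, imp_false,
    Bool.or_false, Bool.false_or]
  generalize hGy : d.getD "green" 0 = y at hy ⊢
  generalize hGx : d.getD "blue" 0 = x at hx ⊢
  generalize hGz : d.getD "red" 0 = z at hz ⊢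
  have hpyz : 0 < y * z := mul_pos hy hz
  have hpxy : 0 < x * y := mul_pos hx hy
  have hpxz : 0 < x * z := mul_pos hx hz
  generalize y * z = Pyz at hpyz ⊢
  generalize x * y = Pxy at hpxy ⊢
  generalize x * z = Pxz at hpxz ⊢
  rw [Bool.eq_iff_iff]
  simp only [Bool.or_eq_true, decide_eq_true_eq]
  omega

theorem pv_shape_g_r_b (d : PySem.Dict String Int) (t : Int) (hy : 0 < d.getD "green" 0) (hz : 0 < d.getD "red" 0) (hx : 0 < d.getD "blue" 0) :
    pvOuter d ["green", "red", "blue"] t (PySem.List.permutations ["green", "red", "blue"] 3) 0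
      = decide (pvScore d ["green", "red", "blue"] ≥ t) := by
  have hperm : PySem.List.permutations ["green", "red", "blue"] 3 = [["green", "red", "blue"], ["green", "blue", "red"], ["red", "green", "blue"], ["red", "blue", "green"], ["blue", "green", "red"], ["blue", "red", "green"]] := by decide
  have hny : ¬ d.getD "green" 0 ≤ 0 := by omega
  have hnz : ¬ d.getD "red" 0 ≤ 0 := by omega
  have hnx : ¬ d.getD "blue" 0 ≤ 0 := by omega
  rw [hperm]
  have hIn : ∀ p ∈ ([["green", "red", "blue"], ["green", "blue", "red"], ["red", "green", "blue"], ["red", "blue", "green"], ["blue", "green", "red"], ["blue", "red", "green"]] : List (List String)),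
      pvInner ["green", "red", "blue"] t p d 0 = Sum.inr true ∨
      ∃ s, pvInner ["green", "red", "blue"] t p d 0 = Sum.inl s ∧ ¬ s ≥ t := by
    intro p hp
    simp only [List.mem_cons, List.not_mem_nil, or_false] at hp
    rcases hp with rfl | rfl | rfl | rfl | rfl | rfl <;>
      (simp only [pvInner, pvHigherSum, List.foldl, PySem.Dict.getD_insert, pvE1, pvE2, pvE3, pvE4,
      pvE5, pvE6, pvB1, pvB2, pvB3, pvC12, pvC21, pvC13, pvC31, pvC23, pvC32, pvZ1, ne_eq,
      not_false_eq_true, not_true_eq_false, if_true, if_false, true_and, false_and, and_true,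
      and_false, gt_iff_lt, reduceIte, mul_add, mul_zero, zero_add, add_zero, hy, hny, hz, hnz, hx, hnx]
       split_ifs <;> first | (left; rfl) | (right; exact ⟨_, rfl, by assumption⟩))
  rw [pv_outer_exists d ["green", "red", "blue"] t [["green", "red", "blue"], ["green", "blue", "red"], ["red", "green", "blue"], ["red", "blue", "green"], ["blue", "green", "red"], ["blue", "red", "green"]] 0 hIn]
  simp only [List.any_cons, List.any_nil, pvScore, List.map, List.sum_cons, List.sum_nil,
    pvInner, pvHigherSum, List.foldl, PySem.Dict.getD_insert, pvE1, pvE2, pvE3, pvE4,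
      pvE5, pvE6, pvB1, pvB2, pvB3, pvC12, pvC21, pvC13, pvC31, pvC23, pvC32, pvZ1, ne_eq,
      not_false_eq_true, not_true_eq_false, if_true, if_false, true_and, false_and, and_true,
      and_false, gt_iff_lt, reduceIte, mul_add, mul_zero, zero_add, add_zero, hy, hny, hz, hnz, hx, hnx, ite_eq_iff, reduceCtorEq, or_false, false_or, imp_false,
    Bool.or_false, Bool.false_or]
  generalize hGy : d.getD "green" 0 = y at hy ⊢
  generalize hGz : d.getD "red" 0 = z at hz ⊢
  generalize hGx : d.getD "blue" 0 = x at hx ⊢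
  have hpyz : 0 < y * z := mul_pos hy hz
  have hpxy : 0 < x * y := mul_pos hx hy
  have hpxz : 0 < x * z := mul_pos hx hz
  generalize y * z = Pyz at hpyz ⊢
  generalize x * y = Pxy at hpxy ⊢
  generalize x * z = Pxz at hpxz ⊢
  rw [Bool.eq_iff_iff]
  simp only [Bool.or_eq_true, decide_eq_true_eq]
  omega

theorem pv_shape_r_b_g (d : PySem.Dict String Int) (t : Int) (hz : 0 < d.getD "red" 0) (hx : 0 < d.getD "blue" 0) (hy : 0 < d.getD "green" 0) :
    pvOuter d ["red", "blue", "green"] t (PySem.List.permutations ["red", "blue", "green"] 3) 0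
      = decide (pvScore d ["red", "blue", "green"] ≥ t) := by
  have hperm : PySem.List.permutations ["red", "blue", "green"] 3 = [["red", "blue", "green"], ["red", "green", "blue"], ["blue", "red", "green"], ["blue", "green", "red"], ["green", "red", "blue"], ["green", "blue", "red"]] := by decide
  have hnz : ¬ d.getD "red" 0 ≤ 0 := by omega
  have hnx : ¬ d.getD "blue" 0 ≤ 0 := by omega
  have hny : ¬ d.getD "green" 0 ≤ 0 := by omega
  rw [hperm]
  have hIn : ∀ p ∈ ([["red", "blue", "green"], ["red", "green", "blue"], ["blue", "red", "green"], ["blue", "green", "red"], ["green", "red", "blue"], ["green", "blue", "red"]] : List (List String)),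
      pvInner ["red", "blue", "green"] t p d 0 = Sum.inr true ∨
      ∃ s, pvInner ["red", "blue", "green"] t p d 0 = Sum.inl s ∧ ¬ s ≥ t := by
    intro p hp
    simp only [List.mem_cons, List.not_mem_nil, or_false] at hp
    rcases hp with rfl | rfl | rfl | rfl | rfl | rfl <;>
      (simp only [pvInner, pvHigherSum, List.foldl, PySem.Dict.getD_insert, pvE1, pvE2, pvE3, pvE4,
      pvE5, pvE6, pvB1, pvB2, pvB3, pvC12, pvC21, pvC13, pvC31, pvC23, pvC32, pvZ1, ne_eq,
      not_false_eq_true, not_true_eq_false, if_true, if_false, true_and, false_and, and_true,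
      and_false, gt_iff_lt, reduceIte, mul_add, mul_zero, zero_add, add_zero, hz, hnz, hx, hnx, hy, hny]
       split_ifs <;> first | (left; rfl) | (right; exact ⟨_, rfl, by assumption⟩))
  rw [pv_outer_exists d ["red", "blue", "green"] t [["red", "blue", "green"], ["red", "green", "blue"], ["blue", "red", "green"], ["blue", "green", "red"], ["green", "red", "blue"], ["green", "blue", "red"]] 0 hIn]
  simp only [List.any_cons, List.any_nil, pvScore, List.map, List.sum_cons, List.sum_nil,
    pvInner, pvHigherSum, List.foldl, PySem.Dict.getD_insert, pvE1, pvE2, pvE3, pvE4,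
      pvE5, pvE6, pvB1, pvB2, pvB3, pvC12, pvC21, pvC13, pvC31, pvC23, pvC32, pvZ1, ne_eq,
      not_false_eq_true, not_true_eq_false, if_true, if_false, true_and, false_and, and_true,
      and_false, gt_iff_lt, reduceIte, mul_add, mul_zero, zero_add, add_zero, hz, hnz, hx, hnx, hy, hny, ite_eq_iff, reduceCtorEq, or_false, false_or, imp_false,
    Bool.or_false, Bool.false_or]
  generalize hGz : d.getD "red" 0 = z at hz ⊢
  generalize hGx : d.getD "blue" 0 = x at hx ⊢
  generalize hGy : d.getD "green" 0 = y at hy ⊢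
  have hpxz : 0 < x * z := mul_pos hx hz
  have hpxy : 0 < x * y := mul_pos hx hy
  have hpyz : 0 < y * z := mul_pos hy hz
  generalize x * z = Pxz at hpxz ⊢
  generalize x * y = Pxy at hpxy ⊢
  generalize y * z = Pyz at hpyz ⊢
  rw [Bool.eq_iff_iff]
  simp only [Bool.or_eq_true, decide_eq_true_eq]
  omega

theorem pv_shape_r_g_b (d : PySem.Dict String Int) (t : Int) (hz : 0 < d.getD "red" 0) (hy : 0 < d.getD "green" 0) (hx : 0 < d.getD "blue" 0) :
    pvOuter d ["red", "green", "blue"] t (PySem.List.permutations ["red", "green", "blue"] 3) 0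
      = decide (pvScore d ["red", "green", "blue"] ≥ t) := by
  have hperm : PySem.List.permutations ["red", "green", "blue"] 3 = [["red", "green", "blue"], ["red", "blue", "green"], ["green", "red", "blue"], ["green", "blue", "red"], ["blue", "red", "green"], ["blue", "green", "red"]] := by decide
  have hnz : ¬ d.getD "red" 0 ≤ 0 := by omega
  have hny : ¬ d.getD "green" 0 ≤ 0 := by omega
  have hnx : ¬ d.getD "blue" 0 ≤ 0 := by omega
  rw [hperm]
  have hIn : ∀ p ∈ ([["red", "green", "blue"], ["red", "blue", "green"], ["green", "red", "blue"], ["green", "blue", "red"], ["blue", "red", "green"], ["blue", "green", "red"]] : List (List String)),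
      pvInner ["red", "green", "blue"] t p d 0 = Sum.inr true ∨
      ∃ s, pvInner ["red", "green", "blue"] t p d 0 = Sum.inl s ∧ ¬ s ≥ t := by
    intro p hp
    simp only [List.mem_cons, List.not_mem_nil, or_false] at hp
    rcases hp with rfl | rfl | rfl | rfl | rfl | rfl <;>
      (simp only [pvInner, pvHigherSum, List.foldl, PySem.Dict.getD_insert, pvE1, pvE2, pvE3, pvE4,
      pvE5, pvE6, pvB1, pvB2, pvB3, pvC12, pvC21, pvC13, pvC31, pvC23, pvC32, pvZ1, ne_eq,
      not_false_eq_true, not_true_eq_false, if_true, if_false, true_and, false_and, and_true,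
      and_false, gt_iff_lt, reduceIte, mul_add, mul_zero, zero_add, add_zero, hz, hnz, hy, hny, hx, hnx]
       split_ifs <;> first | (left; rfl) | (right; exact ⟨_, rfl, by assumption⟩))
  rw [pv_outer_exists d ["red", "green", "blue"] t [["red", "green", "blue"], ["red", "blue", "green"], ["green", "red", "blue"], ["green", "blue", "red"], ["blue", "red", "green"], ["blue", "green", "red"]] 0 hIn]
  simp only [List.any_cons, List.any_nil, pvScore, List.map, List.sum_cons, List.sum_nil,
    pvInner, pvHigherSum, List.foldl, PySem.Dict.getD_insert, pvE1, pvE2, pvE3, pvE4,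
      pvE5, pvE6, pvB1, pvB2, pvB3, pvC12, pvC21, pvC13, pvC31, pvC23, pvC32, pvZ1, ne_eq,
      not_false_eq_true, not_true_eq_false, if_true, if_false, true_and, false_and, and_true,
      and_false, gt_iff_lt, reduceIte, mul_add, mul_zero, zero_add, add_zero, hz, hnz, hy, hny, hx, hnx, ite_eq_iff, reduceCtorEq, or_false, false_or, imp_false,
    Bool.or_false, Bool.false_or]
  generalize hGz : d.getD "red" 0 = z at hz ⊢
  generalize hGy : d.getD "green" 0 = y at hy ⊢
  generalize hGx : d.getD "blue" 0 = x at hx ⊢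
  have hpyz : 0 < y * z := mul_pos hy hz
  have hpxz : 0 < x * z := mul_pos hx hz
  have hpxy : 0 < x * y := mul_pos hx hy
  generalize y * z = Pyz at hpyz ⊢
  generalize x * z = Pxz at hpxz ⊢
  generalize x * y = Pxy at hpxy ⊢
  rw [Bool.eq_iff_iff]
  simp only [Bool.or_eq_true, decide_eq_true_eq]
  omega


-- the singleton case: any single present color (known or not) scores 0
theorem pv_shape_single (d : PySem.Dict String Int) (t : Int) (c : String)
    (hc : 0 < d.getD c 0) :
    pvOuter d [c] t (PySem.List.permutations [c] 1) 0 = decide (pvScore d [c] ≥ t) := by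
  have hperm : PySem.List.permutations [c] 1 = [[c]] := rfl
  rw [hperm]
  simp only [pvOuter, pvInner, pvHigherSum, pvScore, List.foldl, List.map, List.sum_cons,
    List.sum_nil, ne_eq, not_true_eq_false, false_and, if_false, reduceIte, ite_false,
    mul_zero, zero_add, add_zero]
  have hnc : ¬ d.getD c 0 ≤ 0 := by omega
  simp only [hnc, ite_false, if_false, reduceIte]
  split_ifs <;> simp_all <;> omega

-- a nodup list of at least two known colors is one of the twelve literal lists
theorem pv_enum (P : List String) (hnd : P.Nodup)
    (hsub : ∀ c ∈ P, c = "blue" ∨ c = "green" ∨ c = "red") (h2 : 2 ≤ P.length) :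
    P = ["blue", "green"] ∨ P = ["green", "blue"] ∨ P = ["blue", "red"] ∨
    P = ["red", "blue"] ∨ P = ["green", "red"] ∨ P = ["red", "green"] ∨
    P = ["blue", "green", "red"] ∨ P = ["blue", "red", "green"] ∨
    P = ["green", "blue", "red"] ∨ P = ["green", "red", "blue"] ∨
    P = ["red", "blue", "green"] ∨ P = ["red", "green", "blue"] := by
  rcases P with _ | ⟨a, _ | ⟨b, _ | ⟨c, _ | ⟨e, rest⟩⟩⟩⟩
  · simp at h2
  · simp at h2
  · have ha := hsub a (by simp)
    have hb := hsub b (by simp)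
    simp only [List.nodup_cons, List.mem_singleton, List.not_mem_nil, not_false_eq_true,
      and_true, List.nodup_nil] at hnd
    rcases ha with rfl | rfl | rfl <;> rcases hb with rfl | rfl | rfl <;> simp_all
  · have ha := hsub a (by simp)
    have hb := hsub b (by simp)
    have hc := hsub c (by simp)
    simp only [List.nodup_cons, List.mem_cons, List.mem_singleton, List.not_mem_nil] at hnd
    rcases ha with rfl | rfl | rfl <;> rcases hb with rfl | rfl | rfl <;>
      rcases hc with rfl | rfl | rfl <;> simp_all
  · exfalso
    have ha := hsub a (by simp)
    have hb := hsub b (by simp)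
    have hc := hsub c (by simp)
    have he := hsub e (by simp)
    simp only [List.nodup_cons, List.mem_cons] at hnd
    rcases ha with rfl | rfl | rfl <;> rcases hb with rfl | rfl | rfl <;>
      rcases hc with rfl | rfl | rfl <;> rcases he with rfl | rfl | rfl <;> simp_all

-- A's whole computation, for any admissible present-color list P
theorem pv_A_eval (d : PySem.Dict String Int) (t : Int) (P : List String)
    (hP : ∀ c ∈ P, d.getD c 0 > 0) (hnd : P.Nodup)
    (hok : P.length ≤ 1 ∨ ∀ c ∈ P, c = "blue" ∨ c = "green" ∨ c = "red") :
    (if P = [] then decide (t ≤ 0)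
     else pvOuter d P t (PySem.List.permutations P P.length) 0)
      = decide (pvScore d P ≥ t) := by
  rcases P with _ | ⟨c, _ | ⟨c2, rest⟩⟩
  · simp [pvScore, ge_iff_le]
  · rw [if_neg (by simp)]
    exact pv_shape_single d t c (hP c (by simp))
  · rw [if_neg (by simp)]
    have hok' : ∀ x ∈ c :: c2 :: rest, x = "blue" ∨ x = "green" ∨ x = "red" := by
      rcases hok with h | h
      · simp at h
      · exact h
    have h12 := pv_enum _ hnd hok' (by simp)
    rcases h12 with h | h | h | h | h | h | h | h | h | h | h | h <;> rw [h] <;> rw [h] at hP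
    · exact pv_shape_b_g d t (hP _ (by simp)) (hP _ (by simp))
    · exact pv_shape_g_b d t (hP _ (by simp)) (hP _ (by simp))
    · exact pv_shape_b_r d t (hP _ (by simp)) (hP _ (by simp))
    · exact pv_shape_r_b d t (hP _ (by simp)) (hP _ (by simp))
    · exact pv_shape_g_r d t (hP _ (by simp)) (hP _ (by simp))
    · exact pv_shape_r_g d t (hP _ (by simp)) (hP _ (by simp))
    · exact pv_shape_b_g_r d t (hP _ (by simp)) (hP _ (by simp)) (hP _ (by simp))
    · exact pv_shape_b_r_g d t (hP _ (by simp)) (hP _ (by simp)) (hP _ (by simp))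
    · exact pv_shape_g_b_r d t (hP _ (by simp)) (hP _ (by simp)) (hP _ (by simp))
    · exact pv_shape_g_r_b d t (hP _ (by simp)) (hP _ (by simp)) (hP _ (by simp))
    · exact pv_shape_r_b_g d t (hP _ (by simp)) (hP _ (by simp)) (hP _ (by simp))
    · exact pv_shape_r_g_b d t (hP _ (by simp)) (hP _ (by simp)) (hP _ (by simp))

-- lookups in the dict built from a nodup association list
theorem pv_getD_entry (blocks : List (String × Int))
    (hnd : (blocks.map Prod.fst).Nodup) {p : String × Int} (hp : p ∈ blocks) :
    (PySem.Dict.mk blocks).getD p.1 0 = p.2 := by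
  have hk : (PySem.Dict.mk blocks).keys.Nodup := by
    rw [PySem.Dict.keys_mk]; exact hnd
  exact PySem.Dict.getD_of_mem_items _ (by simpa using hp) hk 0

-- A's colors_present equals the keys of the positive-count entries
theorem pv_P_eq (blocks : List (String × Int)) (hnd : (blocks.map Prod.fst).Nodup) :
    (PySem.Dict.mk blocks).keys.filter
        (fun c => (PySem.Dict.mk blocks).getD c 0 > 0)
      = (blocks.filter (fun p => p.2 > 0)).map Prod.fst := by
  rw [PySem.Dict.keys_mk, List.filter_map]
  exact congrArg (List.map Prod.fst) (List.filter_congr (fun p hp => by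
    simp only [Function.comp_apply, pv_getD_entry blocks hnd hp]))

-- a conditional-insert fold is the plain insert fold over the filtered list
theorem pv_foldl_if (l : List (String × Int)) (d : PySem.Dict String Int) :
    l.foldl (fun d p => if p.2 > 0 then d.insert p.1 p.2 else d) d
      = (l.filter (fun p => p.2 > 0)).foldl (fun d p => d.insert p.1 p.2) d := by
  induction l generalizing d with
  | nil => rfl
  | cons p l ih =>
    by_cases h : p.2 > 0 <;> simp [List.filter_cons, h, List.foldl_cons, ih]

-- B's computation equals the closed-form score over the same color list
theorem pv_B_eval (blocks : List (String × Int)) (t : Int)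
    (hnd : (blocks.map Prod.fst).Nodup) :
    can_win_game_alt blocks t
      = decide (pvScore (PySem.Dict.mk blocks)
          ((blocks.filter (fun p => p.2 > 0)).map Prod.fst) ≥ t) := by
  have hitems : (blocks.foldl (fun d p => if p.2 > 0 then d.insert p.1 p.2 else d)
      PySem.Dict.empty).items = blocks.filter (fun p => p.2 > 0) := by
    rw [pv_foldl_if]
    rw [PySem.Dict.items_foldl_insert_fresh (blocks.filter (fun p => p.2 > 0))
      (fun p => p.1) (fun p => p.2) PySem.Dict.empty
      (fun a _ => PySem.Dict.contains_empty _)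
      ((List.Sublist.map _ List.filter_sublist).nodup hnd)]
    simp [show (PySem.Dict.empty : PySem.Dict String Int).items = [] from rfl]
  show decide (_ ≥ t) = decide (_ ≥ t)
  rw [hitems]
  have hsum : ((blocks.filter (fun p => p.2 > 0)).map (fun c =>
      c.2 * (((blocks.filter (fun p => p.2 > 0)).map (fun o =>
        if o.1 ≠ c.1 ∧ (PySem.Dict.mk [("blue", (1 : Int)), ("green", 2), ("red", 3)]).getD o.1 0
            > (PySem.Dict.mk [("blue", (1 : Int)), ("green", 2), ("red", 3)]).getD c.1 0
        then o.2 else 0)).sum))).sum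
      = pvScore (PySem.Dict.mk blocks) ((blocks.filter (fun p => p.2 > 0)).map Prod.fst) := by
    unfold pvScore pvPointValues
    rw [List.map_map]
    refine congrArg List.sum (List.map_congr_left (fun p hp => ?_)).symm
    have hpe := pv_getD_entry blocks hnd (List.mem_of_mem_filter hp)
    simp only [Function.comp_apply, hpe]
    congr 1
    rw [List.map_map]
    refine congrArg List.sum (List.map_congr_left (fun q hq => ?_))
    have hqe := pv_getD_entry blocks hnd (List.mem_of_mem_filter hq)
    simp only [Function.comp_apply, hqe]
  rw [hsum]

-- ===== VERDICT (by name: the statement is the Claim_ definition above) =====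
theorem can_win_game_spec : Claim_equal_can_win_game := by
  intro blocks t _ hpre
  obtain ⟨hnd, hok⟩ := hpre
  show can_win_game blocks t = can_win_game_alt blocks t
  rw [pv_B_eval blocks t hnd]
  show (if ((PySem.Dict.mk blocks).keys.filter
          (fun c => (PySem.Dict.mk blocks).getD c 0 > 0)) = [] then decide (t ≤ 0)
        else pvOuter (PySem.Dict.mk blocks)
          ((PySem.Dict.mk blocks).keys.filter (fun c => (PySem.Dict.mk blocks).getD c 0 > 0)) t
          (PySem.List.permutations
            ((PySem.Dict.mk blocks).keys.filter (fun c => (PySem.Dict.mk blocks).getD c 0 > 0))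
            ((PySem.Dict.mk blocks).keys.filter (fun c => (PySem.Dict.mk blocks).getD c 0 > 0)).length) 0) = _
  rw [pv_P_eq blocks hnd]
  apply pv_A_eval
  · intro c hc
    obtain ⟨p, hpF, rfl⟩ := List.mem_map.mp hc
    have hpb := List.mem_of_mem_filter hpF
    have := List.of_mem_filter hpF
    rw [pv_getD_entry blocks hnd hpb]
    simpa using this
  · exact (List.Sublist.map Prod.fst List.filter_sublist).nodup hnd
  · rcases hok with h | h
    · left; simpa using h
    · right
      intro c hc
      obtain ⟨p, hpF, rfl⟩ := List.mem_map.mp hc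
      exact h p hpF
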